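-- pv_equiv track=rewrite | github.com/remekozicki/ASD | do_egz_t1/z3_egz_20_21_t1/zadanie3_dynamik_przedzialy.py | rec
-- ===== SOURCE A (Python) =====
-- def sumy(u,v):
--     x_u,y_u = u
--     x_v,y_v = v
--     if y_u < x_v or y_v < x_u:
--         a = b = 0
--
--     elif x_u <= x_v:
--         if y_u <= y_v:
--             a = x_v
--             b = y_u
--         elif y_u > y_v:
--             a = x_v
--             b = y_v
--
--     elif x_u > x_v:
--         if y_u <= y_v:
--             a = x_u
--             b = y_u
--         elif y_u > y_v:
--             a = x_u
--             b = y_v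
--
--     return a,b
--
-- def rec(A,k,CP,DP,idx,n):
--
--     if k == 0:
--         return A[idx]
--
--     if n-k-1 > idx:
--         return (0,0)
--
--     if DP[idx][k] != None:
--         return DP[idx][k]
--
--     maxdiff = 0
--     maxrange = (0,0)
--
--     for i in range(idx+1,n):
--         inter = sumy(A[i],rec(A,k-1,CP,DP,i,n))
--
--         if inter[1] - inter[0] > maxdiff:
--             maxdiff = inter[1] - inter[0]
--             maxrange = inter
--
--     DP[idx][k] = maxrange
--     return maxrange
-- ===== SOURCE B (Python) =====
-- def sumy(u, v):
--     x_u, y_u = u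
--     x_v, y_v = v
--     if y_u < x_v or y_v < x_u:
--         return (0, 0)
--     a = x_v if x_u <= x_v else x_u
--     b = y_u if y_u <= y_v else y_v
--     return (a, b)
--
-- def rec(A, k, CP, DP, idx, n):
--     if k == 0:
--         return A[idx]
--     if n - k - 1 > idx:
--         return (0, 0)
--     if DP[idx][k] is not None:
--         return DP[idx][k]
--     # iterative bottom-up rolling-array DP over levels kk = 0..k, positions i in [idx, n)
--     level = A[idx:n]                     # level[i-idx] = value of subproblem (i, kk=0)
--     for kk in range(1, k + 1):
--         nxt = []
--         for i in range(idx, n):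
--             if n - kk - 1 > i:
--                 nxt.append((0, 0))
--             elif DP[i][kk] is not None:
--                 nxt.append(DP[i][kk])
--             else:
--                 best_d, best = 0, (0, 0)
--                 for j in range(i + 1, n):
--                     inter = sumy(A[j], level[j - idx])
--                     d = inter[1] - inter[0]
--                     if d > best_d:
--                         best_d, best = d, inter
--                 nxt.append(best)
--         level = nxt
--     return level[0]
-- ===== Notes on version B (the rewrite author's own statement) =====
-- stated objective: alternative
-- what changed: A's top-down memoized recursion (which mutates DP in place) is replaced by an iterative bottom-up rolling-array DP that fills levels kk=0..k with nested loops, reads the given DP table as a pre-seeded cache, and never recurses or mutates DP.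
-- outside the precondition, e.g. on rec([(0, 0), (1, 1)], -1, [0, 1], [[], [None]], -1, -1): A returns (0, 0), B raises IndexError; on rec([(0, 1)], 1, [], [[None, None], [None, None]], 1, 1): A returns (0, 0), B raises IndexError
import Mathlib
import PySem

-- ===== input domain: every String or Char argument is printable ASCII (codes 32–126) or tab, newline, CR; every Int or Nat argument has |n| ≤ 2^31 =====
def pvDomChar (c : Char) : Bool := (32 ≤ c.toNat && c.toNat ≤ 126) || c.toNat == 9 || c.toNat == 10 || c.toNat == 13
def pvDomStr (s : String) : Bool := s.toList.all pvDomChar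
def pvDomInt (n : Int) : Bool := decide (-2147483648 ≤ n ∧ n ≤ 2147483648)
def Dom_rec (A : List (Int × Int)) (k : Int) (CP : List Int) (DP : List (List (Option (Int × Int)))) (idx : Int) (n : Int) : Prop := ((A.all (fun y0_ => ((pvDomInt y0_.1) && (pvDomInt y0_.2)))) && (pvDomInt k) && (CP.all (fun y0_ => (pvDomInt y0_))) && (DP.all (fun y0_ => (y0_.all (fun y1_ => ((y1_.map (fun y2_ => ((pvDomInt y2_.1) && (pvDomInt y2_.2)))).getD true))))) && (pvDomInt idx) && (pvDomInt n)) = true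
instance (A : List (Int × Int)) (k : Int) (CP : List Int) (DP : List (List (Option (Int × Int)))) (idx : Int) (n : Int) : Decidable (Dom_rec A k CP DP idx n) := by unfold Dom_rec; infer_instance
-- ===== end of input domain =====

-- B replaces A's top-down memoized recursion (which mutates DP in place) by an iterative
-- bottom-up rolling-array DP over levels kk = 0..k; same return value, but B does not
-- mutate DP (the equivalence proved here is about the return value only).

-- ===== PORT A =====
-- DP[i][kk] read (out-of-range excluded by Pre_)
def getE (DP : List (List (Option (Int × Int)))) (i kk : Int) : Option (Int × Int) :=
  PySem.List.pyGetD (PySem.List.pyGetD DP i []) kk none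

-- DP[i][kk] = v (in-place row assignment, modelled functionally; in range under Pre_)
def setE (DP : List (List (Option (Int × Int)))) (i kk : Int) (v : Int × Int) :
    List (List (Option (Int × Int))) :=
  PySem.List.pySetD DP i (PySem.List.pySetD (PySem.List.pyGetD DP i []) kk (some v))

def sumyA (u v : Int × Int) : Int × Int :=
  if u.2 < v.1 ∨ v.2 < u.1 then (0, 0)
  else if u.1 ≤ v.1 then
    (if u.2 ≤ v.2 then (v.1, u.2) else (v.1, v.2))
  else
    (if u.2 ≤ v.2 then (u.1, u.2) else (u.1, v.2))

-- A's recursion, threading the mutated DP; fuel only makes it total (Pre_ gives enough fuel)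
def recAux (fuel : Nat) (A : List (Int × Int)) (k : Int)
    (DP : List (List (Option (Int × Int)))) (idx : Int) (n : Int) :
    (Int × Int) × List (List (Option (Int × Int))) :=
  match fuel with
  | 0 => ((0, 0), DP)
  | fuel + 1 =>
    if k = 0 then (PySem.List.pyGetD A idx (0, 0), DP)
    else if n - k - 1 > idx then ((0, 0), DP)
    else
      match getE DP idx k with
      | some v => (v, DP)
      | none =>
        let r := (PySem.List.pyRange (idx + 1) n 1).foldl
          (fun (st : Int × (Int × Int) × List (List (Option (Int × Int)))) i =>
            let c := recAux fuel A (k - 1) st.2.2 i n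
            let inter := sumyA (PySem.List.pyGetD A i (0, 0)) c.1
            if inter.2 - inter.1 > st.1 then (inter.2 - inter.1, inter, c.2)
            else (st.1, st.2.1, c.2))
          (0, (0, 0), DP)
        (r.2.1, setE r.2.2 idx k r.2.1)

def rec (A : List (Int × Int)) (k : Int) (CP : List Int) (DP : List (List (Option (Int × Int)))) (idx : Int) (n : Int) : Int × Int :=
  (recAux ((n - idx).toNat + 1) A k DP idx n).1

-- ===== PORT B =====
-- DP[i][kk] read on the B side (out-of-range excluded by Pre_)
def getEB (DP : List (List (Option (Int × Int)))) (i kk : Int) : Option (Int × Int) :=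
  PySem.List.pyGetD (PySem.List.pyGetD DP i []) kk none

def sumyB (u v : Int × Int) : Int × Int :=
  if u.2 < v.1 ∨ v.2 < u.1 then (0, 0)
  else ((if u.1 ≤ v.1 then v.1 else u.1), (if u.2 ≤ v.2 then u.2 else v.2))

-- one entry of the next level: value of subproblem (i, kk) from the previous level
def bStep (A : List (Int × Int)) (DP : List (List (Option (Int × Int)))) (n idx kk : Int)
    (level : List (Int × Int)) (i : Int) : Int × Int :=
  if n - kk - 1 > i then (0, 0)
  else
    match getEB DP i kk with
    | some v => v
    | none =>
      ((PySem.List.pyRange (i + 1) n 1).foldl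
        (fun (st : Int × (Int × Int)) j =>
          let inter := sumyB (PySem.List.pyGetD A j (0, 0))
                             (PySem.List.pyGetD level (j - idx) (0, 0))
          if inter.2 - inter.1 > st.1 then (inter.2 - inter.1, inter) else st)
        (0, (0, 0))).2

def bLevel (A : List (Int × Int)) (DP : List (List (Option (Int × Int)))) (n idx : Int)
    (level : List (Int × Int)) (kk : Int) : List (Int × Int) :=
  (PySem.List.pyRange idx n 1).foldl (fun nxt i => nxt ++ [bStep A DP n idx kk level i]) []

def rec_alt (A : List (Int × Int)) (k : Int) (CP : List Int) (DP : List (List (Option (Int × Int)))) (idx : Int) (n : Int) : Int × Int :=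
  if k = 0 then PySem.List.pyGetD A idx (0, 0)
  else if n - k - 1 > idx then (0, 0)
  else
    match getEB DP idx k with
    | some v => v
    | none =>
      let level0 := PySem.List.slice A (some idx) (some n)
      let final := (PySem.List.pyRange 1 (k + 1) 1).foldl (bLevel A DP n idx) level0
      PySem.List.pyGetD final 0 (0, 0)

-- ===== PRECONDITION & SPEC =====
-- Pre_ excludes inputs where A raises (IndexError / unbounded recursion on malformed shapes)
-- and, in the recursive case, shape-inconsistent inputs (idx outside [0,n), k < 0, n larger
-- than len(A) or len(DP), DP rows of length ≤ k) on which A returns a value only through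
-- Python's negative-index wraparound or accidentally empty loop ranges; B naturally raises
-- IndexError on those shapes. (A memoized entry DP[idx][k] that is not None is admitted:
-- there both programs just return it.)
def Pre_rec (A : List (Int × Int)) (k : Int) (CP : List Int) (DP : List (List (Option (Int × Int)))) (idx : Int) (n : Int) : Prop :=
  if k = 0 then -(A.length : Int) ≤ idx ∧ idx < (A.length : Int)
  else if n - k - 1 > idx then True
  else
    (PySem.List.pyGetD (PySem.List.pyGetD DP idx []) k none).isSome = true ∨
    (1 ≤ k ∧ 0 ≤ idx ∧ idx < n ∧ (idx + 1 < n → n ≤ (A.length : Int)) ∧ n ≤ (DP.length : Int) ∧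
     ∀ j : Nat, j < n.toNat → idx ≤ (j : Int) → k < (((DP[j]?).getD []).length : Int))

instance (A : List (Int × Int)) (k : Int) (CP : List Int) (DP : List (List (Option (Int × Int)))) (idx : Int) (n : Int) : Decidable (Pre_rec A k CP DP idx n) := by
  unfold Pre_rec; infer_instance

def pvWitness_rec : (List (Int × Int)) × Int × List Int × (List (List (Option (Int × Int)))) × Int × Int :=
  ([(0, 5), (2, 7)], 1, [], [[none, none], [none, none]], 0, 2)

def Spec_rec (A : List (Int × Int)) (k : Int) (CP : List Int) (DP : List (List (Option (Int × Int)))) (idx : Int) (n : Int) (out : Int × Int) : Prop := out = rec_alt A k CP DP idx n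
instance (A : List (Int × Int)) (k : Int) (CP : List Int) (DP : List (List (Option (Int × Int)))) (idx : Int) (n : Int) (out : Int × Int) : Decidable (Spec_rec A k CP DP idx n out) := by unfold Spec_rec; infer_instance

-- ===== CLAIM (what is proved, stated in full; the proofs are below) =====
def Claim_equal_rec : Prop := ∀ (A : List (Int × Int)) (k : Int) (CP : List Int) (DP : List (List (Option (Int × Int)))) (idx : Int) (n : Int), Dom_rec A k CP DP idx n → Pre_rec A k CP DP idx n → Spec_rec A k CP DP idx n (rec A k CP DP idx n)

-- ===== LEMMAS AND PROOFS =====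

theorem pvWitness_rec_ok :
    Dom_rec pvWitness_rec.1 pvWitness_rec.2.1 pvWitness_rec.2.2.1 pvWitness_rec.2.2.2.1 pvWitness_rec.2.2.2.2.1 pvWitness_rec.2.2.2.2.2 ∧
    Pre_rec pvWitness_rec.1 pvWitness_rec.2.1 pvWitness_rec.2.2.1 pvWitness_rec.2.2.2.1 pvWitness_rec.2.2.2.2.1 pvWitness_rec.2.2.2.2.2 := by
  decide

theorem sumy_eq (u v : Int × Int) : sumyA u v = sumyB u v := by
  unfold sumyA sumyB
  split_ifs <;> simp_all

theorem getEB_eq : getEB = getE := rfl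

-- the pure value of subproblem (i, kk): what A computes, reading only the ORIGINAL DP
def Fnat (A : List (Int × Int)) (DP : List (List (Option (Int × Int)))) (n : Int) :
    Nat → Int → Int × Int
  | 0, i => PySem.List.pyGetD A i (0, 0)
  | m + 1, i =>
    if n - ((m : Int) + 1) - 1 > i then (0, 0)
    else
      match getE DP i ((m : Int) + 1) with
      | some v => v
      | none =>
        ((PySem.List.pyRange (i + 1) n 1).foldl
          (fun (st : Int × (Int × Int)) j =>
            let inter := sumyB (PySem.List.pyGetD A j (0, 0)) (Fnat A DP n m j)
            if inter.2 - inter.1 > st.1 then (inter.2 - inter.1, inter) else st)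
          (0, (0, 0))).2

def gpure (A : List (Int × Int)) (DP : List (List (Option (Int × Int)))) (n : Int) (m : Nat) :
    (Int × (Int × Int)) → Int → Int × (Int × Int) := fun st j =>
  let inter := sumyB (PySem.List.pyGetD A j (0, 0)) (Fnat A DP n m j)
  if inter.2 - inter.1 > st.1 then (inter.2 - inter.1, inter) else st

theorem Fnat_succ (A : List (Int × Int)) (DP : List (List (Option (Int × Int)))) (n : Int)
    (m : Nat) (i : Int) :
    Fnat A DP n (m + 1) i =
      if n - ((m : Int) + 1) - 1 > i then (0, 0)
      else
        match getE DP i ((m : Int) + 1) with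
        | some v => v
        | none => ((PySem.List.pyRange (i + 1) n 1).foldl (gpure A DP n m) (0, (0, 0))).2 := by
  rfl

-- shape safety of the recursive case
def Safe (A : List (Int × Int)) (DP0 : List (List (Option (Int × Int)))) (n k idx : Int) : Prop :=
  1 ≤ k ∧ 0 ≤ idx ∧ idx < n ∧ (idx + 1 < n → n ≤ (A.length : Int)) ∧ n ≤ (DP0.length : Int) ∧
  ∀ j : Int, idx ≤ j → j < n → k < ((PySem.List.pyGetD DP0 j []).length : Int)

def PreAt (A : List (Int × Int)) (DP0 : List (List (Option (Int × Int)))) (n k idx : Int) : Prop :=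
  0 ≤ k ∧ 0 ≤ idx ∧ (¬ k = 0 → ¬ n - k - 1 > idx → Safe A DP0 n k idx)

-- DP states reachable from DP0: every entry is the original one, or was None and now caches Fnat
def Consistent (A : List (Int × Int)) (DP0 DP : List (List (Option (Int × Int)))) (n : Int) : Prop :=
  DP.length = DP0.length ∧
  (∀ i : Int, 0 ≤ i → (PySem.List.pyGetD DP i []).length = (PySem.List.pyGetD DP0 i []).length) ∧
  (∀ i kk : Int, 0 ≤ i → 0 ≤ kk →
    getE DP i kk = getE DP0 i kk ∨
    (getE DP0 i kk = none ∧ getE DP i kk = some (Fnat A DP0 n kk.toNat i)))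

theorem consistent_refl (A : List (Int × Int)) (DP : List (List (Option (Int × Int)))) (n : Int) :
    Consistent A DP DP n := ⟨rfl, fun _ _ => rfl, fun _ _ _ _ => Or.inl rfl⟩

theorem safe_child {A : List (Int × Int)} {DP0 : List (List (Option (Int × Int)))} {n k idx i : Int}
    (h : Safe A DP0 n k idx) (h1 : idx < i) (h2 : i < n) (hk : ¬ k - 1 = 0) :
    Safe A DP0 n (k - 1) i := by
  obtain ⟨hk1, hi0, _, hA, hD, hrow⟩ := h
  exact ⟨by omega, by omega, h2, fun h' => hA (by omega), hD, fun j hj1 hj2 => by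
    have := hrow j (by omega) hj2; omega⟩

theorem length_setE (DP : List (List (Option (Int × Int)))) (i kk : Int) (v : Int × Int) :
    (setE DP i kk v).length = DP.length := by
  unfold setE; exact PySem.List.length_pySetD _ _ _

theorem row_setE (DP : List (List (Option (Int × Int)))) (i i' kk : Int) (v : Int × Int)
    (hi : 0 ≤ i) (hi' : 0 ≤ i') :
    PySem.List.pyGetD (setE DP i kk v) i' [] =
      if i' = i ∧ i.toNat < DP.length then PySem.List.pySetD (PySem.List.pyGetD DP i []) kk (some v)
      else PySem.List.pyGetD DP i' [] := by
  unfold setE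
  rw [PySem.List.pySetD_of_nonneg _ _ hi, PySem.List.pyGetD_of_nonneg _ _ hi',
      PySem.List.pyGetD_of_nonneg _ _ hi']
  simp only [List.getD, List.getElem?_set]
  split_ifs with h1 h2 h2 <;> simp_all <;> omega

theorem getE_setE (DP : List (List (Option (Int × Int)))) (i i' kk kk' : Int) (v : Int × Int)
    (hi : 0 ≤ i) (hi' : 0 ≤ i') (hkk : 0 ≤ kk) (hkk' : 0 ≤ kk')
    (hiR : i < (DP.length : Int)) (hkR : kk < ((PySem.List.pyGetD DP i []).length : Int)) :
    getE (setE DP i kk v) i' kk' =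
      if i' = i ∧ kk' = kk then some v else getE DP i' kk' := by
  unfold getE
  rw [row_setE DP i i' kk v hi hi']
  by_cases h : i' = i
  · rw [if_pos ⟨h, by omega⟩]
    rw [PySem.List.pySetD_of_nonneg _ _ hkk, PySem.List.pyGetD_of_nonneg _ _ hkk',
        PySem.List.pyGetD_of_nonneg _ _ hkk']
    simp only [List.getD, List.getElem?_set]
    split_ifs with h1 h2 h2 <;> simp_all <;> omega
  · rw [if_neg (by simp [h]), if_neg (by simp [h])]

theorem consistent_setE {A : List (Int × Int)} {DP0 DP : List (List (Option (Int × Int)))} {n : Int}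
    (hc : Consistent A DP0 DP n) {idx k : Int}
    (h0 : getE DP0 idx k = none)
    (hi0 : 0 ≤ idx) (hk0 : 0 ≤ k)
    (hiR : idx < (DP0.length : Int)) (hkR : k < ((PySem.List.pyGetD DP0 idx []).length : Int)) :
    Consistent A DP0 (setE DP idx k (Fnat A DP0 n k.toNat idx)) n := by
  obtain ⟨hlen, hrows, hent⟩ := hc
  have hiR' : idx < (DP.length : Int) := by omega
  have hkR' : k < ((PySem.List.pyGetD DP idx []).length : Int) := by rw [hrows idx hi0]; exact hkR
  refine ⟨by rw [length_setE, hlen], fun i hi => ?_, fun i kk hi hkk => ?_⟩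
  · rw [row_setE DP idx i k _ hi0 hi]
    split_ifs with h
    · rw [PySem.List.length_pySetD, h.1]; exact hrows idx hi0
    · exact hrows i hi
  · rw [getE_setE DP idx i k kk _ hi0 hi hk0 hkk hiR' hkR']
    split_ifs with h
    · exact Or.inr ⟨by rw [h.1, h.2]; exact h0, by rw [h.1, h.2]⟩
    · exact hent i kk hi hkk

theorem loop_eval (A : List (Int × Int)) (DP0 : List (List (Option (Int × Int)))) (n : Int)
    (fuel : Nat) (k : Int) (m : Nat) (hm : k - 1 = (m : Int))
    (Hrec : ∀ (i : Int) (DP : List (List (Option (Int × Int)))),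
      Consistent A DP0 DP n → PreAt A DP0 n (k - 1) i → (n - i).toNat < fuel →
      (recAux fuel A (k - 1) DP i n).1 = Fnat A DP0 n (k - 1).toNat i ∧
      Consistent A DP0 (recAux fuel A (k - 1) DP i n).2 n) :
    ∀ (is : List Int) (d : Int) (r : Int × Int) (DP : List (List (Option (Int × Int)))),
      Consistent A DP0 DP n →
      (∀ i ∈ is, 0 ≤ i ∧ i < n ∧ (n - i).toNat < fuel ∧ PreAt A DP0 n (k - 1) i) →
      (is.foldl (fun (st : Int × (Int × Int) × List (List (Option (Int × Int)))) i =>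
          let c := recAux fuel A (k - 1) st.2.2 i n
          let inter := sumyA (PySem.List.pyGetD A i (0, 0)) c.1
          if inter.2 - inter.1 > st.1 then (inter.2 - inter.1, inter, c.2)
          else (st.1, st.2.1, c.2)) (d, r, DP)).1 = (is.foldl (gpure A DP0 n m) (d, r)).1 ∧
      (is.foldl (fun (st : Int × (Int × Int) × List (List (Option (Int × Int)))) i =>
          let c := recAux fuel A (k - 1) st.2.2 i n
          let inter := sumyA (PySem.List.pyGetD A i (0, 0)) c.1
          if inter.2 - inter.1 > st.1 then (inter.2 - inter.1, inter, c.2)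
          else (st.1, st.2.1, c.2)) (d, r, DP)).2.1 = (is.foldl (gpure A DP0 n m) (d, r)).2 ∧
      Consistent A DP0 (is.foldl (fun (st : Int × (Int × Int) × List (List (Option (Int × Int)))) i =>
          let c := recAux fuel A (k - 1) st.2.2 i n
          let inter := sumyA (PySem.List.pyGetD A i (0, 0)) c.1
          if inter.2 - inter.1 > st.1 then (inter.2 - inter.1, inter, c.2)
          else (st.1, st.2.1, c.2)) (d, r, DP)).2.2 n := by
  intro is
  induction is with
  | nil => intro d r DP hc _; exact ⟨rfl, rfl, hc⟩
  | cons i rest ih =>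
    intro d r DP hc hmem
    obtain ⟨hi0, hin, hfuel, hpre⟩ := hmem i (by simp)
    obtain ⟨hv, hc'⟩ := Hrec i DP hc hpre hfuel
    have hvm : (recAux fuel A (k - 1) DP i n).1 = Fnat A DP0 n m i := by
      rw [hv]; congr 1; omega
    simp only [List.foldl_cons]
    have hg : gpure A DP0 n m (d, r) i =
        (if (sumyA (PySem.List.pyGetD A i (0, 0)) (recAux fuel A (k - 1) DP i n).1).2 -
              (sumyA (PySem.List.pyGetD A i (0, 0)) (recAux fuel A (k - 1) DP i n).1).1 > d then
            ((sumyA (PySem.List.pyGetD A i (0, 0)) (recAux fuel A (k - 1) DP i n).1).2 -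
              (sumyA (PySem.List.pyGetD A i (0, 0)) (recAux fuel A (k - 1) DP i n).1).1,
             sumyA (PySem.List.pyGetD A i (0, 0)) (recAux fuel A (k - 1) DP i n).1)
          else (d, r)) := by
      simp only [gpure, ← hvm, ← sumy_eq]
    rw [hg]
    by_cases hcond : (sumyA (PySem.List.pyGetD A i (0, 0)) (recAux fuel A (k - 1) DP i n).1).2 -
        (sumyA (PySem.List.pyGetD A i (0, 0)) (recAux fuel A (k - 1) DP i n).1).1 > d
    · rw [if_pos hcond, if_pos hcond]
      exact ih _ _ _ hc' (fun j hj => hmem j (by simp [hj]))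
    · rw [if_neg hcond, if_neg hcond]
      exact ih _ _ _ hc' (fun j hj => hmem j (by simp [hj]))

theorem recAux_eval (A : List (Int × Int)) (DP0 : List (List (Option (Int × Int)))) (n : Int) :
    ∀ (fuel : Nat) (k idx : Int) (DP : List (List (Option (Int × Int)))),
      Consistent A DP0 DP n → PreAt A DP0 n k idx → (n - idx).toNat < fuel →
      (recAux fuel A k DP idx n).1 = Fnat A DP0 n k.toNat idx ∧
      Consistent A DP0 (recAux fuel A k DP idx n).2 n := by
  intro fuel
  induction fuel with
  | zero => intro k idx DP _ _ hf; omega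
  | succ fuel ih =>
    intro k idx DP hc hp hf
    obtain ⟨hk0, hi0, hmain⟩ := hp
    by_cases hk : k = 0
    · subst hk
      refine ⟨?_, by simpa [recAux] using hc⟩
      simp [recAux, Fnat]
    · obtain ⟨m, hm⟩ : ∃ m : Nat, k.toNat = m + 1 := ⟨k.toNat - 1, by omega⟩
      have hmk : ((m : Int)) + 1 = k := by omega
      by_cases hg : n - k - 1 > idx
      · have hr : recAux (fuel+1) A k DP idx n = ((0,0), DP) := by simp [recAux, hk, hg]
        rw [hr]
        refine ⟨?_, hc⟩
        rw [hm, Fnat_succ, if_pos (by omega : n - ((m:Int)+1) - 1 > idx)]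
      · have hsafe := hmain hk hg
        cases hE : getE DP idx k with
        | some v =>
          have hr : recAux (fuel+1) A k DP idx n = (v, DP) := by simp [recAux, hk, hg, hE]
          rw [hr]
          refine ⟨?_, hc⟩
          rcases hc.2.2 idx k hi0 hk0 with heq | ⟨h0, hwr⟩
          · rw [hm, Fnat_succ, if_neg (by omega)]
            have h2 : getE DP0 idx ((m:Int)+1) = some v := by rw [hmk, ← heq, hE]
            rw [h2]
          · rw [hE] at hwr
            show v = Fnat A DP0 n k.toNat idx
            exact Option.some_inj.mp hwr
        | none =>
          have h00 : getE DP0 idx k = none := by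
            rcases hc.2.2 idx k hi0 hk0 with heq | ⟨h0, hwr⟩
            · rw [← heq]; exact hE
            · rw [hE] at hwr; exact absurd hwr (by simp)
          have hloopmem : ∀ i ∈ PySem.List.pyRange (idx+1) n 1,
              0 ≤ i ∧ i < n ∧ (n - i).toNat < fuel ∧ PreAt A DP0 n (k-1) i := by
            intro i hi
            rw [PySem.List.mem_pyRange_one] at hi
            exact ⟨by omega, hi.2, by omega,
              ⟨by omega, by omega, fun hkz hgz => safe_child hsafe (by omega) hi.2 hkz⟩⟩
          obtain ⟨-, hl2, hl3⟩ := loop_eval A DP0 n fuel k m (by omega)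
            (fun i DP' hc' hp' hf' => ih (k-1) i DP' hc' hp' hf')
            (PySem.List.pyRange (idx+1) n 1) 0 (0,0) DP hc hloopmem
          have hval : ((PySem.List.pyRange (idx+1) n 1).foldl
              (fun (st : Int × (Int × Int) × List (List (Option (Int × Int)))) i =>
                let c := recAux fuel A (k - 1) st.2.2 i n
                let inter := sumyA (PySem.List.pyGetD A i (0, 0)) c.1
                if inter.2 - inter.1 > st.1 then (inter.2 - inter.1, inter, c.2)
                else (st.1, st.2.1, c.2)) (0, (0,0), DP)).2.1 = Fnat A DP0 n k.toNat idx := by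
            rw [hl2, hm, Fnat_succ, if_neg (by omega)]
            have h2 : getE DP0 idx ((m:Int)+1) = none := by rw [hmk]; exact h00
            rw [h2]
          have hr : recAux (fuel+1) A k DP idx n =
              (let r := (PySem.List.pyRange (idx+1) n 1).foldl
                (fun (st : Int × (Int × Int) × List (List (Option (Int × Int)))) i =>
                  let c := recAux fuel A (k - 1) st.2.2 i n
                  let inter := sumyA (PySem.List.pyGetD A i (0, 0)) c.1
                  if inter.2 - inter.1 > st.1 then (inter.2 - inter.1, inter, c.2)
                  else (st.1, st.2.1, c.2)) (0, (0,0), DP)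
               (r.2.1, setE r.2.2 idx k r.2.1)) := by
            simp [recAux, hk, hg, hE]
          rw [hr]
          simp only []
          constructor
          · exact hval
          · rw [hval]
            exact consistent_setE hl3 h00 hi0 hk0
              (by have h1 := hsafe.2.2.1; have h2 := hsafe.2.2.2.2.1; omega)
              (hsafe.2.2.2.2.2 idx (le_refl idx) hsafe.2.2.1)

theorem slice_map (A : List (Int × Int)) (idx n : Int)
    (h0 : 0 ≤ idx) (h1 : idx ≤ n) (h2 : n ≤ (A.length : Int)) :
    PySem.List.slice A (some idx) (some n) =
      (PySem.List.pyRange idx n 1).map (fun i => PySem.List.pyGetD A i (0, 0)) := by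
  rw [PySem.List.slice_toNat A h0 (by omega)]
  apply List.ext_getElem
  · simp [PySem.List.length_pyRange_one]; omega
  · intro t ht1 ht2
    simp only [List.length_take, List.length_drop] at ht1
    simp only [List.getElem_take, List.getElem_drop, List.getElem_map]
    rw [PySem.List.getElem_pyRange_one]
    rw [PySem.List.pyGetD_eq_getElem A _ (by omega) (by omega)]
    congr 1
    simp at ht1 ⊢
    omega

theorem level_lookup (f : Int → Int × Int) (idx n j : Int) (hj1 : idx ≤ j) (hj2 : j < n) :
    PySem.List.pyGetD ((PySem.List.pyRange idx n 1).map f) (j - idx) (0, 0) = f j := by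
  have h : j - idx = ((j - idx).toNat : Int) := by omega
  rw [h, PySem.List.pyGetD_map_pyRange_one f idx n _ _ (by omega)]
  congr 1
  omega

theorem bStep_eval (A : List (Int × Int)) (DP : List (List (Option (Int × Int)))) (n idx : Int)
    (m : Nat) (i : Int) (hi1 : idx ≤ i) :
    bStep A DP n idx ((m : Int) + 1) ((PySem.List.pyRange idx n 1).map (Fnat A DP n m)) i =
      Fnat A DP n (m + 1) i := by
  show _ = Fnat A DP n (m + 1) i
  rw [show Fnat A DP n (m+1) i = (if n - ((m : Int) + 1) - 1 > i then (0, 0)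
      else
        match getE DP i ((m : Int) + 1) with
        | some v => v
        | none =>
          ((PySem.List.pyRange (i + 1) n 1).foldl
            (fun (st : Int × (Int × Int)) j =>
              let inter := sumyB (PySem.List.pyGetD A j (0, 0)) (Fnat A DP n m j)
              if inter.2 - inter.1 > st.1 then (inter.2 - inter.1, inter) else st)
            (0, (0, 0))).2) from rfl]
  unfold bStep
  rw [getEB_eq]
  split_ifs with hg
  · rfl
  · cases hE : getE DP i ((m : Int) + 1) with
    | some v => rfl
    | none =>
      simp only []
      congr 1
      apply PySem.List.foldl_congr_mem
      intro acc j hj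
      rw [PySem.List.mem_pyRange_one] at hj
      rw [level_lookup (Fnat A DP n m) idx n j (by omega) (by omega)]

theorem levels_eval (A : List (Int × Int)) (DP : List (List (Option (Int × Int)))) (n idx : Int)
    (m : Nat) :
    (PySem.List.pyRange 1 ((m : Int) + 1) 1).foldl (bLevel A DP n idx)
        ((PySem.List.pyRange idx n 1).map (Fnat A DP n 0)) =
      (PySem.List.pyRange idx n 1).map (Fnat A DP n m) := by
  induction m with
  | zero => rw [PySem.List.pyRange_one_eq_nil (a := 1) (b := ((0:Nat):Int)+1) (by omega)]; rfl
  | succ m ih =>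
    rw [show ((m + 1 : Nat) : Int) + 1 = (((m : Int) + 1) + 1) by push_cast; ring,
        PySem.List.pyRange_one_succ_right (by omega), List.foldl_append, ih]
    show bLevel A DP n idx _ _ = _
    unfold bLevel
    rw [PySem.List.foldl_congr_mem _ _ (fun nxt i => nxt ++ [Fnat A DP n (m+1) i]) []
      (by intro acc i hi
          rw [PySem.List.mem_pyRange_one] at hi
          rw [bStep_eval A DP n idx m i hi.1]),
      PySem.List.foldl_append_singleton_eq_map]
    simp

-- the last position idx = n-1: every inner range is empty, so the level content is irrelevant
theorem bStep_last (A : List (Int × Int)) (DP : List (List (Option (Int × Int)))) (n idx : Int)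
    (m : Nat) (level : List (Int × Int)) (h : n ≤ idx + 1) :
    bStep A DP n idx ((m : Int) + 1) level idx = Fnat A DP n (m + 1) idx := by
  rw [Fnat_succ]
  unfold bStep
  rw [getEB_eq, PySem.List.pyRange_one_eq_nil (by omega : n ≤ idx + 1)]
  rfl

theorem rec_alt_eval_last (A : List (Int × Int)) (CP : List Int)
    (DP : List (List (Option (Int × Int)))) (idx n k : Int)
    (hk : 1 ≤ k) (hg : ¬ n - k - 1 > idx) (hi0 : 0 ≤ idx) (hin : idx < n)
    (hlast : n ≤ idx + 1) :
    rec_alt A k CP DP idx n = Fnat A DP n k.toNat idx := by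
  obtain ⟨m, hm⟩ : ∃ m : Nat, k.toNat = m + 1 := ⟨k.toNat - 1, by omega⟩
  have hmk : ((m : Int)) + 1 = k := by omega
  unfold rec_alt
  rw [getEB_eq, if_neg (by omega : ¬ k = 0), if_neg hg]
  cases hE : getE DP idx k with
  | some v =>
    rw [hm, Fnat_succ, if_neg (by omega)]
    have h2 : getE DP idx ((m:Int)+1) = some v := by rw [hmk]; exact hE
    rw [h2]
  | none =>
    simp only []
    rw [show k + 1 = k + 1 from rfl, PySem.List.pyRange_one_succ_right (by omega : (1:Int) ≤ k),
        List.foldl_append, List.foldl_cons, List.foldl_nil]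
    show PySem.List.pyGetD (bLevel A DP n idx _ k) 0 (0, 0) = _
    unfold bLevel
    rw [show n = idx + 1 by omega, PySem.List.pyRange_one_singleton, List.foldl_cons,
        List.foldl_nil, List.nil_append]
    rw [show k = ((m : Int) + 1) by omega, bStep_last A DP (idx + 1) idx m _ (by omega),
        PySem.List.pyGetD_zero_cons]
    congr 1

theorem rec_alt_eval (A : List (Int × Int)) (CP : List Int)
    (DP : List (List (Option (Int × Int)))) (idx n k : Int)
    (hk : 1 ≤ k) (hg : ¬ n - k - 1 > idx) (hi0 : 0 ≤ idx) (hin : idx < n)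
    (hA : n ≤ (A.length : Int)) :
    rec_alt A k CP DP idx n = Fnat A DP n k.toNat idx := by
  obtain ⟨m, hm⟩ : ∃ m : Nat, k.toNat = m + 1 := ⟨k.toNat - 1, by omega⟩
  have hmk : ((m : Int)) + 1 = k := by omega
  unfold rec_alt
  rw [getEB_eq, if_neg (by omega : ¬ k = 0), if_neg hg]
  cases hE : getE DP idx k with
  | some v =>
    rw [hm, Fnat_succ, if_neg (by omega)]
    have h2 : getE DP idx ((m:Int)+1) = some v := by rw [hmk]; exact hE
    rw [h2]
  | none =>
    simp only []
    rw [slice_map A idx n hi0 (by omega) hA]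
    rw [show (fun i => PySem.List.pyGetD A i ((0:Int),(0:Int))) = Fnat A DP n 0 from rfl]
    rw [show k + 1 = (((m + 1 : Nat)) : Int) + 1 by push_cast; omega]
    rw [levels_eval A DP n idx (m + 1)]
    rw [hm, PySem.List.pyRange_one_cons hin, List.map_cons, PySem.List.pyGetD_zero_cons]

-- ===== VERDICT (by name: the statement is the Claim_ definition above) =====
theorem rec_spec : Claim_equal_rec := by
  intro A k CP DP idx n _hDom hPre
  unfold Spec_rec
  unfold Pre_rec at hPre
  by_cases hk : k = 0
  · simp only [hk] at hPre ⊢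
    show (recAux ((n - idx).toNat + 1) A 0 DP idx n).1 = rec_alt A 0 CP DP idx n
    simp [recAux, rec_alt]
  · rw [if_neg hk] at hPre
    by_cases hg : n - k - 1 > idx
    · rw [if_pos hg] at hPre
      show (recAux ((n - idx).toNat + 1) A k DP idx n).1 = rec_alt A k CP DP idx n
      simp [recAux, rec_alt, hk, hg]
    · rw [if_neg hg] at hPre
      rcases hPre with hMemo | ⟨hk1, hi0, hin, hA, hD, hrow⟩
      · -- memoized entry: both programs return DP[idx][k]
        obtain ⟨v, hv⟩ := Option.isSome_iff_exists.mp hMemo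
        have hE : getE DP idx k = some v := hv
        show (recAux ((n - idx).toNat + 1) A k DP idx n).1 = rec_alt A k CP DP idx n
        have h1 : (recAux ((n - idx).toNat + 1) A k DP idx n).1 = v := by
          simp [recAux, hk, hg, hE]
        have h2 : rec_alt A k CP DP idx n = v := by
          have hEB : getEB DP idx k = some v := hv
          simp [rec_alt, hk, hg, hEB]
        rw [h1, h2]
      have hsafe : Safe A DP n k idx := by
        refine ⟨hk1, hi0, hin, hA, hD, fun j hj1 hj2 => ?_⟩
        have hj := hrow j.toNat (by omega) (by omega)
        rw [PySem.List.pyGetD_of_nonneg DP [] (by omega : (0:Int) ≤ j)]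
        simpa [List.getD] using hj
      have hfin := (recAux_eval A DP n ((n - idx).toNat + 1) k idx DP (consistent_refl A DP n)
        ⟨by omega, hi0, fun _ _ => hsafe⟩ (by omega)).1
      show (recAux ((n - idx).toNat + 1) A k DP idx n).1 = rec_alt A k CP DP idx n
      by_cases hlast : idx + 1 < n
      · rw [hfin, rec_alt_eval A CP DP idx n k hk1 hg hi0 hin (hA hlast)]
      · rw [hfin, rec_alt_eval_last A CP DP idx n k hk1 hg hi0 hin (by omega)]
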